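-- pv_equiv track=rewrite | github.com/Fondamenti18/fondamenti-di-programmazione | students/1794231/homework05/program02.py | collis
-- ===== SOURCE A (Python) =====
-- def collis(griglia_corrente, griglia_precedente, car):
--     if car!='X':
--         encor=[0,0]
--         enpre=[0,0]
--         en=[0,0]
--         for ny in range(len(griglia_corrente)):
--             for nx in range(len(griglia_corrente[ny])):
--                 if car=='A':
--                     if griglia_corrente[ny][nx]=='B':
--                         encor=[ny, nx]
--                     if griglia_precedente[ny][nx]=='B':
--                         enpre=[ny, nx]
--                 else:
--                     if griglia_corrente[ny][nx]=='A':
--                         encor=[ny, nx]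
--                     if griglia_precedente[ny][nx]=='A':
--                         enpre=[ny, nx]
--         en[0]=enpre[0]-encor[0]
--         en[1]=enpre[1]-encor[1]
--         for cy in range(-1,2):
--             for cx in range(-1,2):
--                 griglia_corrente[encor[0]+en[0]+cy][encor[1]+en[1]+cx]='O'
--     return griglia_corrente
-- ===== SOURCE B (Python) =====
-- def collis(griglia_corrente, griglia_precedente, car):
--     # The displacement en = enpre - encor cancels: the 3x3 block is centered on the
--     # last occurrence (row-major) of the target char in griglia_precedente, so only
--     # that position is needed; find it by one reverse scan with early exit.
--     if car == 'X':
--         return griglia_corrente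
--     target = 'B' if car == 'A' else 'A'
--     py = px = 0
--     for ny in range(len(griglia_corrente) - 1, -1, -1):
--         found = False
--         for nx in range(len(griglia_corrente[ny]) - 1, -1, -1):
--             if griglia_precedente[ny][nx] == target:
--                 py, px = ny, nx
--                 found = True
--                 break
--         if found:
--             break
--     for cy in (-1, 0, 1):
--         for cx in (-1, 0, 1):
--             griglia_corrente[py + cy][px + cx] = 'O'
--     return griglia_corrente
-- ===== Notes on version B (the rewrite author's own statement) =====
-- stated objective: simpler
-- what changed: B drops the encor/displacement bookkeeping entirely (en = enpre - encor algebraically cancels, so the 3x3 block is centered on the last target cell of griglia_precedente) and finds that cell by a single reverse-order scan with early exit instead of A's forward full scan of both grids tracking two positions.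
import Mathlib
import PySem

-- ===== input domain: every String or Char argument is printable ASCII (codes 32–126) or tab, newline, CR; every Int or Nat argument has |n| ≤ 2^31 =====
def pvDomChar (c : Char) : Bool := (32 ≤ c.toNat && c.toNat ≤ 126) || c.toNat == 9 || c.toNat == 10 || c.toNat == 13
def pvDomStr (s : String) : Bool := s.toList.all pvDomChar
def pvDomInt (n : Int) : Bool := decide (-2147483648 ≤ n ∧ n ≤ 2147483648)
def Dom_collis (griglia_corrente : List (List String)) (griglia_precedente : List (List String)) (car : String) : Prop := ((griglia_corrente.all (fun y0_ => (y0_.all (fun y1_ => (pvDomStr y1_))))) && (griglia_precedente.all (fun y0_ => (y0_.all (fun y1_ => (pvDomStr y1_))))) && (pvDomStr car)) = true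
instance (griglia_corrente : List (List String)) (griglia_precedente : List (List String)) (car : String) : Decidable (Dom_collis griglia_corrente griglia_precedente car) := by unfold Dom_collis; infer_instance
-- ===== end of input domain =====

-- B centers the 3x3 'O' block directly on the last target cell of griglia_precedente (A's
-- displacement cancels) found by one reverse scan with early exit: simpler, no encor bookkeeping.
-- Both A and B mutate griglia_corrente in place in Python; the equivalence proved is about the
-- returned value (which is that same mutated grid in both).

-- ===== PORT A =====
def collis (griglia_corrente : List (List String)) (griglia_precedente : List (List String)) (car : String) : List (List String) :=
  if car == "X" then griglia_corrente
  else
    let st :=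
      (PySem.List.pyRange 0 griglia_corrente.length 1).foldl (fun st ny =>
        (PySem.List.pyRange 0 (PySem.List.pyGetD griglia_corrente ny []).length 1).foldl (fun st nx =>
          if car == "A" then
            ((if PySem.List.pyGetD (PySem.List.pyGetD griglia_corrente ny []) nx "" == "B" then (ny, nx) else st.1),
             (if PySem.List.pyGetD (PySem.List.pyGetD griglia_precedente ny []) nx "" == "B" then (ny, nx) else st.2))
          else
            ((if PySem.List.pyGetD (PySem.List.pyGetD griglia_corrente ny []) nx "" == "A" then (ny, nx) else st.1),
             (if PySem.List.pyGetD (PySem.List.pyGetD griglia_precedente ny []) nx "" == "A" then (ny, nx) else st.2))) st)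
        (((0 : Int), (0 : Int)), ((0 : Int), (0 : Int)))
    let encor := st.1
    let enpre := st.2
    let en : Int × Int := (enpre.1 - encor.1, enpre.2 - encor.2)
    (PySem.List.pyRange (-1) 2 1).foldl (fun g cy =>
      (PySem.List.pyRange (-1) 2 1).foldl (fun g cx =>
        PySem.List.pySetD g (encor.1 + en.1 + cy)
          (PySem.List.pySetD (PySem.List.pyGetD g (encor.1 + en.1 + cy) []) (encor.2 + en.2 + cx) "O")) g)
      griglia_corrente

-- ===== PORT B =====
-- inner 'for nx in range(w-1,-1,-1): … break' of Source B
def pvFindRow (gp : List (List String)) (tgt : String) (ny : Int) : List Int → Option (Int × Int)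
  | [] => none
  | nx :: rest =>
      if PySem.List.pyGetD (PySem.List.pyGetD gp ny []) nx "" == tgt then some (ny, nx)
      else pvFindRow gp tgt ny rest

-- outer 'for ny in range(len(gc)-1,-1,-1): … break' of Source B, default (0,0)
def pvScanRows (gc gp : List (List String)) (tgt : String) : List Int → Int × Int
  | [] => (0, 0)
  | ny :: rest =>
      match pvFindRow gp tgt ny (PySem.List.pyRange (((PySem.List.pyGetD gc ny []).length : Int) - 1) (-1) (-1)) with
      | some p => p
      | none => pvScanRows gc gp tgt rest

def collis_alt (griglia_corrente : List (List String)) (griglia_precedente : List (List String)) (car : String) : List (List String) :=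
  if car == "X" then griglia_corrente
  else
    let tgt := if car == "A" then "B" else "A"
    let p := pvScanRows griglia_corrente griglia_precedente tgt
      (PySem.List.pyRange ((griglia_corrente.length : Int) - 1) (-1) (-1))
    ([-1, 0, 1] : List Int).foldl (fun g cy =>
      ([-1, 0, 1] : List Int).foldl (fun g cx =>
        PySem.List.pySetD g (p.1 + cy)
          (PySem.List.pySetD (PySem.List.pyGetD g (p.1 + cy) []) (p.2 + cx) "O")) g)
      griglia_corrente

-- ===== PRECONDITION & SPEC =====
-- helpers for Pre_: the last row-major cell of griglia_precedente (over griglia_corrente's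
-- index ranges) holding the target char, default (0,0) — a declarative filter/getLast?, not a port
def pvLastCell (gc gp : List (List String)) (tgt : String) : Nat × Nat :=
  ((((List.range gc.length).flatMap (fun ny => (List.range (gc.getD ny []).length).map (fun nx => (ny, nx)))).filter
      (fun p => (gp.getD p.1 []).getD p.2 "" == tgt)).getLast?).getD (0, 0)

-- Pre_ = exactly the inputs where Python A returns (no IndexError): every nonempty row of
-- griglia_corrente must fit inside griglia_precedente, and the 3x3 write block around the
-- last target cell (with Python's -1 wraparound on the low side) must be in range.
def Pre_collis (griglia_corrente : List (List String)) (griglia_precedente : List (List String)) (car : String) : Prop :=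
  (car == "X" ||
   ((List.range griglia_corrente.length).all (fun ny =>
      (griglia_corrente.getD ny []).isEmpty ||
      (decide (ny < griglia_precedente.length) &&
       decide ((griglia_corrente.getD ny []).length ≤ (griglia_precedente.getD ny []).length))) &&
    (let p := pvLastCell griglia_corrente griglia_precedente (if car == "A" then "B" else "A")
     decide (p.1 + 2 ≤ griglia_corrente.length) &&
     ([if p.1 = 0 then griglia_corrente.length - 1 else p.1 - 1, p.1, p.1 + 1].all (fun r =>
        decide (p.2 + 2 ≤ (griglia_corrente.getD r []).length)))))) = true
instance (griglia_corrente : List (List String)) (griglia_precedente : List (List String)) (car : String) : Decidable (Pre_collis griglia_corrente griglia_precedente car) := by unfold Pre_collis; infer_instance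

def pvWitness_collis : List (List String) × List (List String) × String :=
  ([[".", ".", "."], [".", ".", "."], [".", ".", "."]],
   [[".", ".", "."], [".", "B", "."], [".", ".", "."]], "A")

def Spec_collis (griglia_corrente : List (List String)) (griglia_precedente : List (List String)) (car : String) (out : List (List String)) : Prop := out = collis_alt griglia_corrente griglia_precedente car
instance (griglia_corrente : List (List String)) (griglia_precedente : List (List String)) (car : String) (out : List (List String)) : Decidable (Spec_collis griglia_corrente griglia_precedente car out) := by unfold Spec_collis; infer_instance

-- ===== CLAIM (what is proved, stated in full; the proofs are below) =====
def Claim_equal_collis : Prop := ∀ (griglia_corrente : List (List String)) (griglia_precedente : List (List String)) (car : String), Dom_collis griglia_corrente griglia_precedente car → Pre_collis griglia_corrente griglia_precedente car → Spec_collis griglia_corrente griglia_precedente car (collis griglia_corrente griglia_precedente car)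

-- ===== LEMMAS AND PROOFS =====

-- A's inner keep-last loop over any index list = ((filter).getLast?.map pair).getD acc
lemma foldl_keeplast (P : Int → Bool) (f : Int → Int × Int) (l : List Int) (a : Int × Int) :
    l.foldl (fun acc c => if P c then f c else acc) a = ((l.filter P).getLast?.map f).getD a := by
  induction l generalizing a with
  | nil => rfl
  | cons c l ih =>
      simp only [List.foldl_cons, List.filter_cons]
      by_cases h : P c = true
      · rw [if_pos h, if_pos h, ih, List.getLast?_cons]
        cases (l.filter P).getLast? <;> rfl
      · rw [if_neg h, if_neg h]
        exact ih a

-- B's inner linear search = (filter).head?.map pair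
lemma pvFindRow_eq (gp : List (List String)) (tgt : String) (ny : Int) (l : List Int) :
    pvFindRow gp tgt ny l
      = ((l.filter (fun nx => PySem.List.pyGetD (PySem.List.pyGetD gp ny []) nx "" == tgt)).head?).map
          (fun nx => (ny, nx)) := by
  induction l with
  | nil => rfl
  | cons c l ih =>
      simp only [pvFindRow, List.filter_cons]
      by_cases h : PySem.List.pyGetD (PySem.List.pyGetD gp ny []) c "" == tgt
      · simp [h]
      · simp [h, ih]

-- per row: A's forward keep-last over range(w) = B's reverse find with default
lemma row_bridge (gc gp : List (List String)) (tgt : String) (ny : Int) (a : Int × Int) :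
    (PySem.List.pyRange 0 (PySem.List.pyGetD gc ny []).length 1).foldl
        (fun acc nx => if PySem.List.pyGetD (PySem.List.pyGetD gp ny []) nx "" == tgt then (ny, nx) else acc) a
      = (pvFindRow gp tgt ny
          (PySem.List.pyRange (((PySem.List.pyGetD gc ny []).length : Int) - 1) (-1) (-1))).getD a := by
  have hrev : PySem.List.pyRange (((PySem.List.pyGetD gc ny []).length : Int) - 1) (-1) (-1)
      = (PySem.List.pyRange 0 (PySem.List.pyGetD gc ny []).length 1).reverse := by
    rw [PySem.List.pyRange_neg_one_eq_reverse]; norm_num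
  rw [hrev, pvFindRow_eq, List.filter_reverse, List.head?_reverse,
    foldl_keeplast (fun nx => PySem.List.pyGetD (PySem.List.pyGetD gp ny []) nx "" == tgt) (fun nx => (ny, nx))]

-- first-hit form of B's outer loop
def pvFirstHit (gc gp : List (List String)) (tgt : String) : List Int → Option (Int × Int)
  | [] => none
  | ny :: rest =>
      (pvFindRow gp tgt ny (PySem.List.pyRange (((PySem.List.pyGetD gc ny []).length : Int) - 1) (-1) (-1))).or
        (pvFirstHit gc gp tgt rest)

lemma pvScanRows_eq_firstHit (gc gp : List (List String)) (tgt : String) (l : List Int) :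
    pvScanRows gc gp tgt l = (pvFirstHit gc gp tgt l).getD (0, 0) := by
  induction l with
  | nil => rfl
  | cons ny rest ih =>
      simp only [pvScanRows, pvFirstHit]
      cases pvFindRow gp tgt ny (PySem.List.pyRange (((PySem.List.pyGetD gc ny []).length : Int) - 1) (-1) (-1)) with
      | none => simpa using ih
      | some p => rfl

-- A's outer forward fold (enpre component) = first hit over the reversed row list
lemma outer_bridge (gc gp : List (List String)) (tgt : String) (l : List Int) (a : Int × Int) :
    l.foldl (fun acc ny =>
        (PySem.List.pyRange 0 (PySem.List.pyGetD gc ny []).length 1).foldl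
          (fun acc nx => if PySem.List.pyGetD (PySem.List.pyGetD gp ny []) nx "" == tgt then (ny, nx) else acc) acc) a
      = (pvFirstHit gc gp tgt l.reverse).getD a := by
  induction l using List.reverseRecOn generalizing a with
  | nil => rfl
  | append_singleton l ny ih =>
      rw [List.foldl_append, List.foldl_cons, List.foldl_nil, row_bridge, List.reverse_append]
      simp only [List.reverse_cons, List.reverse_nil, List.nil_append, List.singleton_append, pvFirstHit]
      cases h : pvFindRow gp tgt ny (PySem.List.pyRange (((PySem.List.pyGetD gc ny []).length : Int) - 1) (-1) (-1)) with
      | none => rw [Option.none_or, Option.getD_none]; exact ih a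
      | some p => rfl

-- the scan phases agree: A's joint fold's enpre component = B's reverse scan
lemma scan_eq (gc gp : List (List String)) (tgt : String) :
    ((PySem.List.pyRange 0 gc.length 1).foldl (fun st ny =>
        (PySem.List.pyRange 0 (PySem.List.pyGetD gc ny []).length 1).foldl (fun st nx =>
          ((if PySem.List.pyGetD (PySem.List.pyGetD gc ny []) nx "" == tgt then (ny, nx) else st.1),
           (if PySem.List.pyGetD (PySem.List.pyGetD gp ny []) nx "" == tgt then (ny, nx) else st.2))) st)
        (((0 : Int), (0 : Int)), ((0 : Int), (0 : Int)))).2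
      = pvScanRows gc gp tgt (PySem.List.pyRange ((gc.length : Int) - 1) (-1) (-1)) := by
  have hsplit : ∀ (l : List Int) (a b : Int × Int),
      l.foldl (fun st ny =>
        (PySem.List.pyRange 0 (PySem.List.pyGetD gc ny []).length 1).foldl (fun st nx =>
          ((if PySem.List.pyGetD (PySem.List.pyGetD gc ny []) nx "" == tgt then (ny, nx) else st.1),
           (if PySem.List.pyGetD (PySem.List.pyGetD gp ny []) nx "" == tgt then (ny, nx) else st.2))) st) (a, b)
      = (l.foldl (fun acc ny =>
            (PySem.List.pyRange 0 (PySem.List.pyGetD gc ny []).length 1).foldl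
              (fun acc nx => if PySem.List.pyGetD (PySem.List.pyGetD gc ny []) nx "" == tgt then (ny, nx) else acc) acc) a,
         l.foldl (fun acc ny =>
            (PySem.List.pyRange 0 (PySem.List.pyGetD gc ny []).length 1).foldl
              (fun acc nx => if PySem.List.pyGetD (PySem.List.pyGetD gp ny []) nx "" == tgt then (ny, nx) else acc) acc) b) := by
    intro l
    induction l with
    | nil => intro a b; rfl
    | cons ny rest ih =>
        intro a b
        simp only [List.foldl_cons]
        rw [PySem.List.foldl_prod_mk
            (f := fun acc nx => if PySem.List.pyGetD (PySem.List.pyGetD gc ny []) nx "" == tgt then (ny, nx) else acc)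
            (g := fun acc nx => if PySem.List.pyGetD (PySem.List.pyGetD gp ny []) nx "" == tgt then (ny, nx) else acc)]
        exact ih _ _
  rw [hsplit]
  have hrevrows : PySem.List.pyRange ((gc.length : Int) - 1) (-1) (-1)
      = (PySem.List.pyRange 0 gc.length 1).reverse := by
    rw [PySem.List.pyRange_neg_one_eq_reverse]; norm_num
  rw [pvScanRows_eq_firstHit, hrevrows]
  exact outer_bridge gc gp tgt (PySem.List.pyRange 0 gc.length 1) ((0 : Int), (0 : Int))

-- the unconditional equality of the two ports
lemma collis_eq_alt (gc gp : List (List String)) (car : String) :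
    collis gc gp car = collis_alt gc gp car := by
  unfold collis collis_alt
  by_cases hx : car == "X"
  · simp [hx]
  · simp only [hx, Bool.false_eq_true, if_false]
    have hr : PySem.List.pyRange (-1) 2 1 = ([-1, 0, 1] : List Int) := by decide
    have hcancel : ∀ a b c : Int, a + (b - a) + c = b + c := by intro a b c; ring
    by_cases hA : car == "A"
    · simp only [hA, if_true, hr, hcancel]
      rw [scan_eq gc gp "B"]
    · simp only [hA, Bool.false_eq_true, if_false, hr, hcancel]
      rw [scan_eq gc gp "A"]

-- ===== VERDICT (by name: the statement is the Claim_ definition above) =====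
theorem collis_spec : Claim_equal_collis := by
  intro gc gp car _ _
  unfold Spec_collis
  exact collis_eq_alt gc gp car
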